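-- pv_equiv track=rewrite | github.com/jp3tty/engineering-log-intelligence | api/service_health.py | _get_worst_status
-- ===== SOURCE A (Python) =====
-- def _get_worst_status(statuses):
--     """Get the worst status from a list"""
--     priority = {
--         'critical': 0,
--         'degraded': 1,
--         'warning': 2,
--         'healthy': 3,
--         'unknown': 4
--     }
--
--     worst = 'healthy'
--     worst_priority = 999
--
--     for status in statuses:
--         if priority.get(status, 999) < worst_priority:
--             worst = status
--             worst_priority = priority.get(status, 999)
--
--     return worst
-- ===== SOURCE B (Python) =====
-- def _get_worst_status(statuses):
--     """Get the worst status from a list"""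
--     for name in ('critical', 'degraded', 'warning', 'healthy', 'unknown'):
--         if name in statuses:
--             return name
--     return 'healthy'
-- ===== Notes on version B (the rewrite author's own statement) =====
-- stated objective: simpler
-- what changed: Instead of scanning the list while tracking a running minimum priority, B walks the fixed severity table in worst-first order and returns the first name present in the list (falling back to 'healthy').
import Mathlib
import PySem

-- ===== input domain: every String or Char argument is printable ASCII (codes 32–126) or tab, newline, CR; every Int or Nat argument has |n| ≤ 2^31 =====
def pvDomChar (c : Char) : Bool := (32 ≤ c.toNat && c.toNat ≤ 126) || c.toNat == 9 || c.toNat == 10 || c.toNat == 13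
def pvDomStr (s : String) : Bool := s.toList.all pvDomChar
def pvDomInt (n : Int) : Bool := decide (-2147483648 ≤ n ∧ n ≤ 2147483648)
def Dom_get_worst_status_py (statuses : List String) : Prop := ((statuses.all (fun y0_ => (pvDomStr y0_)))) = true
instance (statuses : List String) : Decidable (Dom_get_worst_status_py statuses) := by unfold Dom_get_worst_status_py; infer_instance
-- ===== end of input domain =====

-- B walks the fixed severity table in worst-first order and returns the first name present in
-- the list, instead of scanning the list while tracking a running minimum priority (objective: simpler).

-- ===== PORT A =====
def pvPriority : PySem.Dict String Int :=
  PySem.Dict.ofList [("critical", 0), ("degraded", 1), ("warning", 2), ("healthy", 3), ("unknown", 4)]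

def get_worst_status_py (statuses : List String) : String :=
  (statuses.foldl
    (fun (st : String × Int) status =>
      if pvPriority.getD status 999 < st.2 then (status, pvPriority.getD status 999) else st)
    ("healthy", 999)).1

-- ===== PORT B =====
def get_worst_status_py_alt (statuses : List String) : String :=
  ((["critical", "degraded", "warning", "healthy", "unknown"].find?
      (fun name => statuses.contains name)).getD "healthy")

-- ===== PRECONDITION & SPEC =====
def Spec_get_worst_status_py (statuses : List String) (out : String) : Prop := out = get_worst_status_py_alt statuses
instance (statuses : List String) (out : String) : Decidable (Spec_get_worst_status_py statuses out) := by unfold Spec_get_worst_status_py; infer_instance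

-- ===== CLAIM (what is proved, stated in full; the proofs are below) =====
def Claim_equal_get_worst_status_py : Prop := ∀ (statuses : List String), Dom_get_worst_status_py statuses → Spec_get_worst_status_py statuses (get_worst_status_py statuses)

-- ===== LEMMAS AND PROOFS =====

-- priority(s) with default 999
def pvPrio (s : String) : Int := pvPriority.getD s 999

-- minimum priority occurring in the list (999 if none lower)
def pvMp (l : List String) : Int := l.foldr (fun s m => min (pvPrio s) m) 999

-- inverse of the priority table on known names
def pvInv (k : Int) : String :=
  if k = 0 then "critical" else if k = 1 then "degraded" else if k = 2 then "warning"
  else if k = 3 then "healthy" else "unknown"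

-- the literal dict, in mk form (closed computation)
theorem pvPriority_mk : pvPriority = PySem.Dict.mk
    [("critical", 0), ("degraded", 1), ("warning", 2), ("healthy", 3), ("unknown", 4)] := by decide

theorem pvPrio_eq (s : String) : pvPrio s =
    if "critical" == s then 0 else if "degraded" == s then 1 else if "warning" == s then 2
    else if "healthy" == s then 3 else if "unknown" == s then 4 else 999 := by
  simp only [pvPrio, pvPriority_mk, PySem.Dict.getD_eq_get?_getD, PySem.Dict.get?_mk_cons]
  split_ifs <;> simp [PySem.Dict.get?]

theorem pvInv_0 : pvInv 0 = "critical" := by decide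
theorem pvInv_1 : pvInv 1 = "degraded" := by decide
theorem pvInv_2 : pvInv 2 = "warning" := by decide
theorem pvInv_3 : pvInv 3 = "healthy" := by decide

theorem pvPrio_nonneg (s : String) : 0 ≤ pvPrio s := by
  rw [pvPrio_eq]; split_ifs <;> omega

theorem pvPrio_le (s : String) : pvPrio s ≤ 999 := by
  rw [pvPrio_eq]; split_ifs <;> omega

theorem pvInv_prio (s : String) (h : pvPrio s < 999) : pvInv (pvPrio s) = s := by
  revert h
  rw [pvPrio_eq]
  split_ifs with h1 h2 h3 h4 h5 <;> intro h <;> simp_all [pvInv]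

theorem pvMp_le_999 (l : List String) : pvMp l ≤ 999 := by
  induction l with
  | nil => simp [pvMp]
  | cons s t ih => simp only [pvMp, List.foldr_cons] at *; omega

theorem pvMp_nonneg (l : List String) : 0 ≤ pvMp l := by
  induction l with
  | nil => simp [pvMp]
  | cons s t ih =>
    have := pvPrio_nonneg s
    simp only [pvMp, List.foldr_cons] at *; omega

theorem pvMp_le_of_mem {s : String} {l : List String} (h : s ∈ l) : pvMp l ≤ pvPrio s := by
  induction l with
  | nil => cases h
  | cons a t ih =>
    rcases List.mem_cons.mp h with rfl | hm
    · simp only [pvMp, List.foldr_cons]; omega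
    · have := ih hm
      simp only [pvMp, List.foldr_cons] at *; omega

theorem pvMp_attained (l : List String) : pvMp l = 999 ∨ ∃ s ∈ l, pvPrio s = pvMp l := by
  induction l with
  | nil => left; simp [pvMp]
  | cons a t ih =>
    have hcons : pvMp (a :: t) = min (pvPrio a) (pvMp t) := by simp [pvMp]
    by_cases hle : pvPrio a ≤ pvMp t
    · right; exact ⟨a, List.mem_cons_self, by omega⟩
    · rcases ih with h999 | ⟨s, hs, hp⟩
      · left; have := pvPrio_le a; omega
      · right; exact ⟨s, List.mem_cons_of_mem _ hs, by omega⟩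

theorem pv_loop_key (l : List String) : ∀ (w : String) (p : Int), p ≤ 999 →
    (l.foldl
      (fun (st : String × Int) status =>
        if pvPriority.getD status 999 < st.2 then (status, pvPriority.getD status 999) else st)
      (w, p)).1 = if pvMp l < p then pvInv (pvMp l) else w := by
  induction l with
  | nil =>
    intro w p hp
    simp only [List.foldl_nil, pvMp, List.foldr_nil]
    rw [if_neg (by omega)]
  | cons s t ih =>
    intro w p hp
    have hcons : pvMp (s :: t) = min (pvPrio s) (pvMp t) := by simp [pvMp]
    have hps : pvPriority.getD s 999 = pvPrio s := rfl
    simp only [List.foldl_cons, hps]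
    by_cases hlt : pvPrio s < p
    · rw [if_pos hlt, ih s (pvPrio s) (pvPrio_le s)]
      by_cases h2 : pvMp t < pvPrio s
      · rw [if_pos h2, if_pos (by omega)]
        congr 1; omega
      · rw [if_neg h2, if_pos (by omega)]
        have : min (pvPrio s) (pvMp t) = pvPrio s := by omega
        rw [hcons, this, pvInv_prio s (by omega)]
    · rw [if_neg hlt, ih w p hp]
      by_cases h2 : pvMp t < p
      · rw [if_pos h2, if_pos (by omega)]
        congr 1; omega
      · rw [if_neg h2, if_neg (by omega)]

theorem pvA_eq (l : List String) :
    get_worst_status_py l = if pvMp l < 999 then pvInv (pvMp l) else "healthy" := by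
  exact pv_loop_key l "healthy" 999 (by omega)

theorem pvB_eq (l : List String) :
    get_worst_status_py_alt l =
      if "critical" ∈ l then "critical" else if "degraded" ∈ l then "degraded"
      else if "warning" ∈ l then "warning" else if "healthy" ∈ l then "healthy"
      else if "unknown" ∈ l then "unknown" else "healthy" := by
  simp only [get_worst_status_py_alt, List.find?_cons]
  by_cases h1 : "critical" ∈ l <;> by_cases h2 : "degraded" ∈ l <;>
    by_cases h3 : "warning" ∈ l <;> by_cases h4 : "healthy" ∈ l <;>
    by_cases h5 : "unknown" ∈ l <;>
    simp [h1, h2, h3, h4, h5, List.find?]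

theorem pvPrio_lit_c : pvPrio "critical" = 0 := by decide
theorem pvPrio_lit_d : pvPrio "degraded" = 1 := by decide
theorem pvPrio_lit_w : pvPrio "warning" = 2 := by decide
theorem pvPrio_lit_h : pvPrio "healthy" = 3 := by decide
theorem pvPrio_lit_u : pvPrio "unknown" = 4 := by decide

-- if the minimum is attained at value k < 999, the witness is pvInv k and is in l
theorem pv_witness_mem {l : List String} (h : pvMp l < 999) : pvInv (pvMp l) ∈ l := by
  rcases pvMp_attained l with h999 | ⟨s, hs, hp⟩
  · omega
  · rw [← hp, pvInv_prio s (by omega)]; exact hs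

-- ===== VERDICT (by name: the statement is the Claim_ definition above) =====
theorem get_worst_status_py_spec : Claim_equal_get_worst_status_py := by
  unfold Claim_equal_get_worst_status_py
  intro l _
  unfold Spec_get_worst_status_py
  rw [pvA_eq, pvB_eq]
  have hnn := pvMp_nonneg l
  by_cases h1 : "critical" ∈ l
  · have hle := pvMp_le_of_mem h1; rw [pvPrio_lit_c] at hle
    have hm : pvMp l = 0 := by omega
    simp [hm, h1, pvInv]
  · by_cases h2 : "degraded" ∈ l
    · have hle := pvMp_le_of_mem h2; rw [pvPrio_lit_d] at hle
      have hm : pvMp l = 0 ∨ pvMp l = 1 := by omega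
      rcases hm with hm | hm
      · exact absurd (by have := pv_witness_mem (l := l) (by omega); rwa [hm, pvInv_0] at this) h1
      · simp [hm, h1, h2, pvInv]
    · by_cases h3 : "warning" ∈ l
      · have hle := pvMp_le_of_mem h3; rw [pvPrio_lit_w] at hle
        have hm : pvMp l = 0 ∨ pvMp l = 1 ∨ pvMp l = 2 := by omega
        rcases hm with hm | hm | hm
        · exact absurd (by have := pv_witness_mem (l := l) (by omega); rwa [hm, pvInv_0] at this) h1
        · exact absurd (by have := pv_witness_mem (l := l) (by omega); rwa [hm, pvInv_1] at this) h2
        · simp [hm, h1, h2, h3, pvInv]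
      · by_cases h4 : "healthy" ∈ l
        · have hle := pvMp_le_of_mem h4; rw [pvPrio_lit_h] at hle
          have hm : pvMp l = 0 ∨ pvMp l = 1 ∨ pvMp l = 2 ∨ pvMp l = 3 := by omega
          rcases hm with hm | hm | hm | hm
          · exact absurd (by have := pv_witness_mem (l := l) (by omega); rwa [hm, pvInv_0] at this) h1
          · exact absurd (by have := pv_witness_mem (l := l) (by omega); rwa [hm, pvInv_1] at this) h2
          · exact absurd (by have := pv_witness_mem (l := l) (by omega); rwa [hm, pvInv_2] at this) h3
          · simp [hm, h1, h2, h3, h4, pvInv]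
        · by_cases h5 : "unknown" ∈ l
          · have hle := pvMp_le_of_mem h5; rw [pvPrio_lit_u] at hle
            have hm : pvMp l = 0 ∨ pvMp l = 1 ∨ pvMp l = 2 ∨ pvMp l = 3 ∨ pvMp l = 4 := by omega
            rcases hm with hm | hm | hm | hm | hm
            · exact absurd (by have := pv_witness_mem (l := l) (by omega); rwa [hm, pvInv_0] at this) h1
            · exact absurd (by have := pv_witness_mem (l := l) (by omega); rwa [hm, pvInv_1] at this) h2
            · exact absurd (by have := pv_witness_mem (l := l) (by omega); rwa [hm, pvInv_2] at this) h3
            · exact absurd (by have := pv_witness_mem (l := l) (by omega); rwa [hm, pvInv_3] at this) h4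
            · simp [hm, h1, h2, h3, h4, h5, pvInv]
          · have hm : pvMp l = 999 := by
              by_contra hne
              have h999 := pvMp_le_999 l
              have hmem := pv_witness_mem (l := l) (by omega)
              have hle := pvMp_le_of_mem hmem
              have hinv := pvInv_prio (pvInv (pvMp l)) (by
                rcases pvMp_attained l with hx | ⟨s, hs, hp⟩
                · omega
                · rw [← hp, pvInv_prio s (by omega)]; omega)
              -- pvMp l ∈ {0,..,4} contradicts all memberships
              rcases pvMp_attained l with hx | ⟨s, hs, hp⟩
              · omega
              · have hs5 : pvPrio s < 999 := by omega
                revert hs5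
                rw [pvPrio_eq]
                split_ifs with g1 g2 g3 g4 g5 <;> intro _ <;> simp_all
            simp [hm, h1, h2, h3, h4, h5]
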